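-- pv_equiv track=rewrite | github.com/shalomfr/Ocr2026 | backend/services/line_segmentation.py | _merge_close_lines
-- ===== SOURCE A (Python) =====
-- def _merge_close_lines(lines, max_gap):
--     """Merge lines that are closer than max_gap"""
--     if not lines:
--         return []
--
--     merged = [lines[0]]
--
--     for current_start, current_end in lines[1:]:
--         last_start, last_end = merged[-1]
--
--         # Check gap between last line end and current line start
--         gap = current_start - last_end
--
--         if gap <= max_gap:
--             # Merge lines
--             merged[-1] = (last_start, current_end)
--         else:
--             # Add as new line
--             merged.append((current_start, current_end))
--
--     return merged
-- ===== SOURCE B (Python) =====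
-- def _merge_close_lines(lines, max_gap):
--     """Merge lines that are closer than max_gap (two-pass: flag group starts, then emit groups)"""
--     if not lines:
--         return []
--     # pass 1: a line starts a new group iff its gap to the ORIGINAL predecessor exceeds max_gap
--     # (merging never changes an interval's end, so this is the same criterion A uses)
--     new_group = [True] + [cur[0] - prev[1] > max_gap for prev, cur in zip(lines, lines[1:])]
--     # pass 2: emit one interval per group
--     out = []
--     for flag, (s, e) in zip(new_group, lines):
--         if flag:
--             out.append((s, e))
--         else:
--             out[-1] = (out[-1][0], e)
--     return out
-- ===== Notes on version B (the rewrite author's own statement) =====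
-- stated objective: alternative
-- what changed: B is two-pass: it first flags which lines start a new group by comparing each line with its original predecessor (exploiting that merging never changes an interval's end), then emits one interval per group; A is a single fold that inspects and rewrites the last element of the accumulated output.
import Mathlib
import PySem

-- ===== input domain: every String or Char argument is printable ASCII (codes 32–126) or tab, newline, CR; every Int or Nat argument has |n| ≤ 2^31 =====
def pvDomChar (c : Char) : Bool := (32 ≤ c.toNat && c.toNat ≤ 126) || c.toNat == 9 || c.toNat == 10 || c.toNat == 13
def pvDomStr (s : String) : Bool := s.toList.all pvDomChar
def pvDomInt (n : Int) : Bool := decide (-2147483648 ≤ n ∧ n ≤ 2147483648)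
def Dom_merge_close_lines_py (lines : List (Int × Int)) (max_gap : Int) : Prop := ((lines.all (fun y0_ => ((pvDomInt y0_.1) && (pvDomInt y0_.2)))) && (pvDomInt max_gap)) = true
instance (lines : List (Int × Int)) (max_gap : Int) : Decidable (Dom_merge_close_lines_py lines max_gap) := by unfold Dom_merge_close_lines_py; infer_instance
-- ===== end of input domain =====

-- B replaces A's fold that rewrites the last accumulated interval by a two-pass grouping
-- (flag group starts against the original predecessor, then emit one interval per group);
-- objective: alternative decomposition, same O(n) cost.

-- ===== PORT A =====
-- loop body of A's for-loop (merged is A's accumulator; merged[-1] read via getLastD, never empty)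
def mergeStepA (max_gap : Int) (merged : List (Int × Int)) (cur : Int × Int) : List (Int × Int) :=
  let last := merged.getLastD (0, 0)
  if cur.1 - last.2 ≤ max_gap then merged.dropLast ++ [(last.1, cur.2)]
  else merged ++ [cur]

def merge_close_lines_py (lines : List (Int × Int)) (max_gap : Int) : List (Int × Int) :=
  match lines with
  | [] => []
  | l0 :: rest => rest.foldl (mergeStepA max_gap) [l0]

-- ===== PORT B =====
-- loop body of B's second pass (out[-1] read via getLastD, never empty: first flag is true)
def mergeStepB (out : List (Int × Int)) (p : Bool × (Int × Int)) : List (Int × Int) :=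
  if p.1 then out ++ [p.2]
  else out.dropLast ++ [((out.getLastD (0, 0)).1, p.2.2)]

def merge_close_lines_py_alt (lines : List (Int × Int)) (max_gap : Int) : List (Int × Int) :=
  match lines with
  | [] => []
  | _ :: _ =>
    let new_group := true :: (lines.zip (lines.drop 1)).map
      (fun pc => decide (pc.2.1 - pc.1.2 > max_gap))
    (new_group.zip lines).foldl mergeStepB []

-- ===== PRECONDITION & SPEC =====
def Spec_merge_close_lines_py (lines : List (Int × Int)) (max_gap : Int) (out : List (Int × Int)) : Prop := out = merge_close_lines_py_alt lines max_gap
instance (lines : List (Int × Int)) (max_gap : Int) (out : List (Int × Int)) : Decidable (Spec_merge_close_lines_py lines max_gap out) := by unfold Spec_merge_close_lines_py; infer_instance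

-- ===== CLAIM (what is proved, stated in full; the proofs are below) =====
def Claim_equal_merge_close_lines_py : Prop := ∀ (lines : List (Int × Int)) (max_gap : Int), Dom_merge_close_lines_py lines max_gap → Spec_merge_close_lines_py lines max_gap (merge_close_lines_py lines max_gap)

-- ===== LEMMAS AND PROOFS =====

-- common reference function: the merged list starting from first element (s, e) over the rest
def mspec (g : Int) : Int × Int → List (Int × Int) → List (Int × Int)
  | (s, e), [] => [(s, e)]
  | (s, e), (c, d) :: rest =>
    if c - e ≤ g then mspec g (s, d) rest else (s, e) :: mspec g (c, d) rest

theorem mergeA_loop (g : Int) (ys : List (Int × Int)) :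
    ∀ (done : List (Int × Int)) (s e : Int),
      ys.foldl (mergeStepA g) (done ++ [(s, e)]) = done ++ mspec g (s, e) ys := by
  induction ys with
  | nil => intro done s e; simp [mspec]
  | cons cd rest ih =>
    intro done s e
    obtain ⟨c, d⟩ := cd
    simp only [List.foldl_cons, mergeStepA, List.getLastD_concat, List.dropLast_concat, mspec]
    by_cases h : c - e ≤ g
    · simp only [h, if_pos]
      exact ih done s d
    · simp only [h, if_false, List.append_assoc]
      have := ih (done ++ [(s, e)]) c d
      simpa using this
  
theorem mergeB_loop (g : Int) (ys : List (Int × Int)) :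
    ∀ (done : List (Int × Int)) (s : Int) (cd : Int × Int),
      (((((cd :: ys).zip ys).map (fun pc => decide (pc.2.1 - pc.1.2 > g))).zip ys).foldl
        mergeStepB (done ++ [(s, cd.2)])) = done ++ mspec g (s, cd.2) ys := by
  induction ys with
  | nil => intro done s cd; simp [mspec]
  | cons cd' rest ih =>
    intro done s cd
    obtain ⟨c', d'⟩ := cd'
    simp only [List.zip_cons_cons, List.map_cons, List.foldl_cons, mergeStepB,
      List.getLastD_concat, List.dropLast_concat, mspec]
    by_cases h : c' - cd.2 ≤ g
    · have hf : ¬ (c' - cd.2 > g) := by omega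
      simp only [hf, decide_false, Bool.false_eq_true, if_false, if_pos h]
      exact ih done s (c', d')
    · have hf : (c' - cd.2 > g) := by omega
      simp only [hf, decide_true, if_pos, if_neg h, List.append_assoc]
      have := ih (done ++ [(s, cd.2)]) c' (c', d')
      simpa using this

theorem both_eq_mspec (lines : List (Int × Int)) (g : Int) :
    merge_close_lines_py lines g = merge_close_lines_py_alt lines g := by
  cases lines with
  | nil => rfl
  | cons l0 rest =>
    obtain ⟨s, e⟩ := l0
    show rest.foldl (mergeStepA g) [(s, e)] = _
    have hA := mergeA_loop g rest [] s e
    simp only [List.nil_append] at hA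
    rw [hA]
    show _ = ((true :: (((s, e) :: rest).zip rest).map
        (fun pc => decide (pc.2.1 - pc.1.2 > g))).zip ((s, e) :: rest)).foldl mergeStepB []
    rw [List.zip_cons_cons, List.foldl_cons]
    have hstep : mergeStepB [] (true, (s, e)) = [] ++ [(s, e)] := by simp [mergeStepB]
    rw [hstep]
    have hB := mergeB_loop g rest [] s (s, e)
    simp only [List.nil_append] at hB
    exact hB.symm

-- ===== VERDICT (by name: the statement is the Claim_ definition above) =====
theorem merge_close_lines_py_spec : Claim_equal_merge_close_lines_py := by
  intro lines max_gap _
  unfold Spec_merge_close_lines_py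
  exact both_eq_mspec lines max_gap
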